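-- pv_equiv track=rewrite | github.com/tailongswayam2000/Store-Monitoring-Backend | app/helper.py | accumulate_from_date
-- ===== SOURCE A (Python) =====
-- def accumulate_from_date(start_time: int, intervals: list) -> int:
--     uptime = 0
--     i = 0
--     n = len(intervals)
--     while i < n and start_time > intervals[i][1]:
--         i += 1
--     if i == n:
--         return uptime
--     if start_time >= intervals[i][0] and start_time <= intervals[i][1]:
--         uptime += intervals[i][1] - start_time
--         i += 1
--     while i < n:
--         uptime += intervals[i][1] - intervals[i][0]
--         i += 1
--     return uptime
-- ===== SOURCE B (Python) =====
-- def accumulate_from_date(start_time: int, intervals: list) -> int: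
--     # Complement approach: take the grand total of all interval lengths and
--     # return it minus the part excluded before the cut point (the skipped
--     # prefix plus the clipped-off left part of the first surviving interval).
--     total = sum(h - l for l, h in intervals)
--     for j, (l, h) in enumerate(intervals):
--         if h >= start_time:
--             return total - sum(b - a for a, b in intervals[:j]) - max(0, start_time - l)
--     return 0
-- ===== Notes on version B (the rewrite author's own statement) =====
-- stated objective: alternative
-- what changed: Instead of A's skip-then-accumulate walk (skip loop, special-cased partial first interval, second sum loop), B computes the grand total of all interval lengths once and subtracts the excluded part: the lengths of the skipped prefix and the clipped left portion max(0, start_time - l) of the first interval whose right end reaches start_time.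
import Mathlib
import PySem

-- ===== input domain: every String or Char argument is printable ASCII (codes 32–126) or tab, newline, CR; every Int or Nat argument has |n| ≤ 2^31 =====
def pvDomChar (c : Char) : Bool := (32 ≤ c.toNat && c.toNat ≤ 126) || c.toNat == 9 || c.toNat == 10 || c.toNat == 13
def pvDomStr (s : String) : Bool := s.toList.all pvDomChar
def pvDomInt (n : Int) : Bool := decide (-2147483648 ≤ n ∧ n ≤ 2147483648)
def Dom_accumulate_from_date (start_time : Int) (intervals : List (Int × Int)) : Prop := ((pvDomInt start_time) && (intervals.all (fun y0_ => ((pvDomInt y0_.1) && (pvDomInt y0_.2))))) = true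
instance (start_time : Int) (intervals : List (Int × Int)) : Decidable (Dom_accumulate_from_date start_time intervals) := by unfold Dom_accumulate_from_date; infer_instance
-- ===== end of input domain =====

-- B replaces A's skip-then-accumulate walk by a complement computation: the grand total of all
-- interval lengths minus the skipped prefix lengths and the clipped left part of the cut interval.

-- ===== PORT A =====
-- A's first while loop: advance past intervals whose right end is before start_time
def aSkip (start_time : Int) : List (Int × Int) → List (Int × Int)
  | [] => []
  | (l, h) :: t => if start_time > h then aSkip start_time t else (l, h) :: t

-- A's second while loop: uptime += hi - lo for each remaining interval
def aSumLens : List (Int × Int) → Int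
  | [] => 0
  | (l, h) :: t => (h - l) + aSumLens t

def accumulate_from_date (start_time : Int) (intervals : List (Int × Int)) : Int :=
  match aSkip start_time intervals with
  | [] => 0
  | (l, h) :: t =>
      if start_time ≥ l ∧ start_time ≤ h then (h - start_time) + aSumLens t
      else aSumLens ((l, h) :: t)

-- ===== PORT B =====
-- sum(h - l for l, h in xs)
def bTotal (xs : List (Int × Int)) : Int := (xs.map (fun p => p.2 - p.1)).sum

-- B's for loop over enumerate(intervals): j is the running index, orig the full list (for the slice)
def bLoop (s total : Int) (orig : List (Int × Int)) : Nat → List (Int × Int) → Int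
  | _, [] => 0
  | j, (l, h) :: t =>
      if h ≥ s then total - bTotal (orig.take j) - max 0 (s - l)
      else bLoop s total orig (j + 1) t

def accumulate_from_date_alt (start_time : Int) (intervals : List (Int × Int)) : Int :=
  bLoop start_time (bTotal intervals) intervals 0 intervals

-- ===== PRECONDITION & SPEC =====
def Spec_accumulate_from_date (start_time : Int) (intervals : List (Int × Int)) (out : Int) : Prop := out = accumulate_from_date_alt start_time intervals
instance (start_time : Int) (intervals : List (Int × Int)) (out : Int) : Decidable (Spec_accumulate_from_date start_time intervals out) := by unfold Spec_accumulate_from_date; infer_instance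

-- ===== CLAIM (what is proved, stated in full; the proofs are below) =====
def Claim_equal_accumulate_from_date : Prop := ∀ (start_time : Int) (intervals : List (Int × Int)), Dom_accumulate_from_date start_time intervals → Spec_accumulate_from_date start_time intervals (accumulate_from_date start_time intervals)

-- ===== LEMMAS AND PROOFS =====
theorem bTotal_append (xs ys : List (Int × Int)) : bTotal (xs ++ ys) = bTotal xs + bTotal ys := by
  simp [bTotal]

theorem aSumLens_eq_bTotal (xs : List (Int × Int)) : aSumLens xs = bTotal xs := by
  induction xs with
  | nil => rfl
  | cons p t ih => obtain ⟨l, h⟩ := p; simp [aSumLens, bTotal] at *; omega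

-- A on a suffix equals B's loop run at the matching index of the full list.
theorem bLoop_eq_A (s : Int) (orig : List (Int × Int)) :
    ∀ (xs : List (Int × Int)) (j : Nat), orig.drop j = xs →
      bLoop s (bTotal orig) orig j xs = accumulate_from_date s xs := by
  intro xs
  induction xs with
  | nil => intro j _; rfl
  | cons p t ih =>
      obtain ⟨l, h⟩ := p
      intro j hdrop
      have horig : orig = orig.take j ++ (l, h) :: t := by
        conv_lhs => rw [← List.take_append_drop j orig]
        rw [hdrop]
      have htot : bTotal orig = bTotal (orig.take j) + (h - l) + bTotal t := by
        conv_lhs => rw [horig]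
        rw [bTotal_append]; simp [bTotal]; ring
      by_cases hc : h ≥ s
      · have hA : accumulate_from_date s ((l, h) :: t)
            = if s ≥ l ∧ s ≤ h then (h - s) + aSumLens t else aSumLens ((l, h) :: t) := by
          unfold accumulate_from_date aSkip
          have : ¬ s > h := by omega
          simp [this]
        rw [hA]
        show (if h ≥ s then bTotal orig - bTotal (orig.take j) - max 0 (s - l)
              else bLoop s (bTotal orig) orig (j + 1) t) = _
        rw [if_pos hc, htot]
        by_cases hl : s ≥ l
        · rw [if_pos ⟨hl, by omega⟩, aSumLens_eq_bTotal]
          have : max 0 (s - l) = s - l := by omega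
          omega
        · rw [if_neg (by tauto)]
          simp only [aSumLens, aSumLens_eq_bTotal]
          have : max 0 (s - l) = 0 := by omega
          omega
      · have hdrop' : orig.drop (j + 1) = t := by
          have := congrArg (List.drop 1) hdrop
          simpa [List.drop_drop, Nat.add_comm] using this
        have hsk : aSkip s ((l, h) :: t) = aSkip s t := by
          rw [show aSkip s ((l, h) :: t) = if s > h then aSkip s t else (l, h) :: t from rfl,
            if_pos (by omega)]
        have hA : accumulate_from_date s ((l, h) :: t) = accumulate_from_date s t := by
          unfold accumulate_from_date
          rw [hsk]
        show (if h ≥ s then _ else bLoop s (bTotal orig) orig (j + 1) t) = _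
        rw [if_neg hc, hA]
        exact ih (j + 1) hdrop'

-- ===== VERDICT (by name: the statement is the Claim_ definition above) =====
theorem accumulate_from_date_spec : Claim_equal_accumulate_from_date := by
  intro s iv _
  unfold Spec_accumulate_from_date accumulate_from_date_alt
  exact (bLoop_eq_A s iv iv 0 rfl).symm
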